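-- pv_equiv track=rewrite | github.com/lastweek/FlashRL | flashrl/framework/serving/vllm.py | _prompt_ranges
-- ===== SOURCE A (Python) =====
-- def _prompt_ranges(prompt_count: int, shard_count: int) -> list[tuple[int, int]]:
--     base, remainder = divmod(prompt_count, shard_count)
--     ranges: list[tuple[int, int]] = []
--     start = 0
--     for shard_index in range(shard_count):
--         size = base + (1 if shard_index < remainder else 0)
--         end = start + size
--         ranges.append((start, end))
--         start = end
--     return ranges
-- ===== SOURCE B (Python) =====
-- def _prompt_ranges(prompt_count: int, shard_count: int) -> list[tuple[int, int]]:
--     base, remainder = divmod(prompt_count, shard_count)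
--     return [
--         (i * base + min(i, remainder), (i + 1) * base + min(i + 1, remainder))
--         for i in range(shard_count)
--     ]
-- ===== Notes on version B (the rewrite author's own statement) =====
-- stated objective: simpler
-- what changed: Replaces the running-accumulator loop by a comprehension whose per-shard start/end are computed independently in closed form (start_i = i*base + min(i, remainder)).
import Mathlib
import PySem

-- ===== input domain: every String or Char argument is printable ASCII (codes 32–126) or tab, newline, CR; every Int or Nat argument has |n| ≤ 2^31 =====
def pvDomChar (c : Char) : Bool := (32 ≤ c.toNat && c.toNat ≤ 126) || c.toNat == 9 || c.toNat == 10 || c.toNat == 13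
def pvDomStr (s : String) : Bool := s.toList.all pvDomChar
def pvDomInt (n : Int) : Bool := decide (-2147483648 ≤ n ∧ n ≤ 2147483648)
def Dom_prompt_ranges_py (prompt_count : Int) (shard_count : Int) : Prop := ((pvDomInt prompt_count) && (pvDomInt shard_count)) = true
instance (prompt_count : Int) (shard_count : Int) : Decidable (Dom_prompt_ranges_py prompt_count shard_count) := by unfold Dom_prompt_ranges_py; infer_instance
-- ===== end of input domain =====

-- B replaces A's running-accumulator loop by a map whose per-shard bounds are
-- computed independently in closed form (objective: simpler decomposition).

-- ===== PORT A =====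
def prompt_ranges_py (prompt_count : Int) (shard_count : Int) : List (Int × Int) :=
  match PySem.Int.divmod? prompt_count shard_count with
  | none => []   -- shard_count = 0: Python raises ZeroDivisionError; excluded by Pre_
  | some (base, remainder) =>
    ((PySem.List.pyRange 0 shard_count 1).foldl
      (fun (st : List (Int × Int) × Int) shard_index =>
        let size := base + (if shard_index < remainder then (1 : Int) else 0)
        let e := st.2 + size
        (st.1 ++ [(st.2, e)], e))
      ([], 0)).1

-- ===== PORT B =====
def prompt_ranges_py_alt (prompt_count : Int) (shard_count : Int) : List (Int × Int) :=
  match PySem.Int.divmod? prompt_count shard_count with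
  | none => []   -- shard_count = 0: Python raises ZeroDivisionError; excluded by Pre_
  | some (base, remainder) =>
    (PySem.List.pyRange 0 shard_count 1).map
      (fun i => (i * base + min i remainder, (i + 1) * base + min (i + 1) remainder))

-- ===== PRECONDITION & SPEC =====
-- Pre_ excludes exactly shard_count = 0, on which A's divmod raises ZeroDivisionError.
def Pre_prompt_ranges_py (prompt_count : Int) (shard_count : Int) : Prop := shard_count ≠ 0
instance (prompt_count : Int) (shard_count : Int) : Decidable (Pre_prompt_ranges_py prompt_count shard_count) := by unfold Pre_prompt_ranges_py; infer_instance
def pvWitness_prompt_ranges_py : Int × Int := (7, 3)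

def Spec_prompt_ranges_py (prompt_count : Int) (shard_count : Int) (out : List (Int × Int)) : Prop := out = prompt_ranges_py_alt prompt_count shard_count
instance (prompt_count : Int) (shard_count : Int) (out : List (Int × Int)) : Decidable (Spec_prompt_ranges_py prompt_count shard_count out) := by unfold Spec_prompt_ranges_py; infer_instance

-- ===== CLAIM (what is proved, stated in full; the proofs are below) =====
def Claim_equal_prompt_ranges_py : Prop := ∀ (prompt_count : Int) (shard_count : Int), Dom_prompt_ranges_py prompt_count shard_count → Pre_prompt_ranges_py prompt_count shard_count → Spec_prompt_ranges_py prompt_count shard_count (prompt_ranges_py prompt_count shard_count)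

-- ===== LEMMAS AND PROOFS =====

-- the closed-form boundary B uses
def pvBound (base remainder i : Int) : Int := i * base + min i remainder

lemma pv_loop_eq (base remainder : Int) (hrem : 0 ≤ remainder) (n : Nat) :
    (PySem.List.pyRange 0 (n : Int) 1).foldl
      (fun (st : List (Int × Int) × Int) shard_index =>
        let size := base + (if shard_index < remainder then (1 : Int) else 0)
        let e := st.2 + size
        (st.1 ++ [(st.2, e)], e))
      ([], 0)
    = ((PySem.List.pyRange 0 (n : Int) 1).map
        (fun i => (pvBound base remainder i, pvBound base remainder (i + 1))),
       pvBound base remainder (n : Int)) := by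
  induction n with
  | zero =>
    simp [PySem.List.pyRange_one_eq_nil (by omega : (0:Int) ≤ 0), pvBound]
    omega
  | succ n ih =>
    have h : (((n : Nat) + 1 : Nat) : Int) = (n : Int) + 1 := by push_cast; ring
    rw [h, PySem.List.pyRange_one_succ_right (by positivity), List.foldl_append,
        List.map_append, ih]
    have hmin : min ((n : Int) + 1) remainder
        = min (n : Int) remainder + (if (n : Int) < remainder then 1 else 0) := by
      split_ifs <;> omega
    have hstep : pvBound base remainder (n : Int) + (base + if (n : Int) < remainder then 1 else 0)
        = pvBound base remainder ((n : Int) + 1) := by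
      simp only [pvBound, hmin]; split_ifs <;> ring
    simp [hstep]

lemma pv_mod_nonneg (a b q r : Int) (hb : 0 < b)
    (h : PySem.Int.divmod? a b = some (q, r)) : 0 ≤ r := by
  simp [PySem.Int.divmod?, hb.ne'] at h
  rw [← h.2, Int.fmod_eq_emod_of_nonneg _ hb.le]
  exact Int.emod_nonneg a hb.ne'

-- ===== VERDICT (by name: the statement is the Claim_ definition above) =====
theorem prompt_ranges_py_spec : Claim_equal_prompt_ranges_py := by
  intro pc sc _ hpre
  unfold Spec_prompt_ranges_py prompt_ranges_py prompt_ranges_py_alt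
  rcases h : PySem.Int.divmod? pc sc with _ | ⟨base, remainder⟩
  · rfl
  · dsimp only
    rcases lt_or_gt_of_ne hpre with hneg | hpos
    · rw [PySem.List.pyRange_one_eq_nil (by omega)]; rfl
    · have hrem : 0 ≤ remainder := pv_mod_nonneg pc sc base remainder hpos h
      obtain ⟨n, hn⟩ : ∃ n : Nat, sc = (n : Int) := ⟨sc.toNat, by omega⟩
      subst hn
      rw [pv_loop_eq base remainder hrem n]
      rfl
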